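-- pv_equiv track=rewrite | github.com/snelliott/LOHC-Score | score.py | _polycyclic_rings
-- ===== SOURCE A (Python) =====
-- def _polycyclic_rings(rings_atms):
--     """ returns tuple of monocyclic rings for a tuple
--         of all rings in a tuple(tuple(int,)) where int is atm key
--     """
--     # find each ring that each ring is connected to
--     connected_ring_idxs_tup = ()
--     for ring_atms_i in rings_atms:
--         connected_ring_idxs = set()
--         for idx_j, ring_atms_j in enumerate(rings_atms):
--             if any([j_atm in ring_atms_i for j_atm in ring_atms_j]):
--                 connected_ring_idxs.add(idx_j)
--         connected_ring_idxs_tup += (connected_ring_idxs,)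
--
--     # gotta keep walking through the connections for polycyclics
--     missing_conns = True
--     while missing_conns:
--         new_conns_tup = ()
--         for conns_i in connected_ring_idxs_tup:
--             new_conns = set()
--             for conns_j in connected_ring_idxs_tup:
--                 if any([j_idx in conns_i for j_idx in conns_j]):
--                     [new_conns.add(j_idx) for j_idx in conns_j]
--             new_conns_tup += (new_conns,)
--         if connected_ring_idxs_tup == new_conns_tup:
--             missing_conns = False
--         else:
--             connected_ring_idxs_tup = new_conns_tup
--
--     # remove redundant ring groups
--     unique_conn_idxs = ()
--     for idxs in connected_ring_idxs_tup:
--         if idxs not in unique_conn_idxs: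
--             unique_conn_idxs += (idxs,)
--
--     # split into mono, bi, and tri+ cyclic groups
--     ret = [(), (), ()]
--     for ring_network in unique_conn_idxs:
--         ring_atm_network = ()
--         for idx in ring_network:
--             ring_atm_network += (rings_atms[idx],)
--         ret[min(len(ring_network)-1, 2)] += (ring_atm_network,)
--     return ret
-- ===== SOURCE B (Python) =====
-- def _polycyclic_rings(rings_atms):
--     """ returns tuple of monocyclic rings for a tuple
--         of all rings in a tuple(tuple(int,)) where int is atm key
--     """
--     n = len(rings_atms)
--     atom_sets = [set(r) for r in rings_atms]
--     seen = [False] * n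
--     ret = [(), (), ()]
--     for i in range(n):
--         if seen[i]:
--             continue
--         # collect the connected component of ring i with a stack search
--         seen[i] = True
--         stack = [i]
--         comp = []
--         while stack:
--             u = stack.pop()
--             comp.append(u)
--             for v in range(n):
--                 if not seen[v] and not atom_sets[u].isdisjoint(atom_sets[v]):
--                     seen[v] = True
--                     stack.append(v)
--         comp.sort()
--         network = tuple(rings_atms[k] for k in comp)
--         ret[min(len(comp) - 1, 2)] += (network,)
--     return ret
-- ===== Notes on version B (the rewrite author's own statement) =====
-- stated objective: faster
-- what changed: Replaces A's iterate-until-stable whole-relation closure (recompute every ring's connection set from every other set each round, then deduplicate the sets) by one stack search per connected component over the ring-overlap graph; …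
-- outside the precondition, e.g. on _polycyclic_rings([[], [0]]): A returns [[[[0]]], [], [[]]], B returns [[[[]], [[0]]], [], []]
import Mathlib
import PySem

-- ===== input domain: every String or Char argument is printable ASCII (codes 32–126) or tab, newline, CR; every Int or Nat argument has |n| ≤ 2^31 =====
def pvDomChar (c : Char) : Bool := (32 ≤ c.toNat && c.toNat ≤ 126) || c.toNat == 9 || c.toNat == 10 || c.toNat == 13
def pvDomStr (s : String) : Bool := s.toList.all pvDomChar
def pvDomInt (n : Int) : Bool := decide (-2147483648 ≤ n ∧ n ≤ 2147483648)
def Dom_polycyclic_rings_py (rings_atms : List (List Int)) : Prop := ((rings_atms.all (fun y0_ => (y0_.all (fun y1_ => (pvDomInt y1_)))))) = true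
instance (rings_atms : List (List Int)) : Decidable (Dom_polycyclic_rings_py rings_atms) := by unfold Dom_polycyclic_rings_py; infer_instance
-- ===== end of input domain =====

-- B replaces A's repeated whole-relation fixed-point closure by one stack search per
-- connected ring group (objective: faster).

-- ===== PORT A =====
-- A stores ring INDICES (0..n-1) in Python sets. While the sets are only compared, probed
-- for membership and unioned (order-insensitive), they are modelled as strictly ascending
-- lists; where a set's ITERATION ORDER reaches the output ('for idx in ring_network') the
-- order is read off a model of CPython's set hash table (pvPyOrder below). Exact on Pre_'s
-- domain, where that order is proved ascending.

-- any([j_atm in ring_atms_i for j_atm in ring_atms_j])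
def pvAnyShared (ri rj : List Int) : Bool := rj.any (fun a => ri.contains a)

-- set.add into the ascending-list model of a CPython set of small ints
def pvSIns (x : Nat) : List Nat → List Nat
  | [] => [x]
  | y :: ys => if x < y then x :: y :: ys else if x = y then y :: ys else y :: pvSIns x ys

-- first pass: connected_ring_idxs_tup (idx_j is added in ascending order)
def pvConns0 (rings_atms : List (List Int)) : List (List Nat) :=
  rings_atms.map (fun ri =>
    (List.range rings_atms.length).filter (fun j => pvAnyShared ri (rings_atms.getD j [])))

-- one round of the while-loop body: new_conns_tup from connected_ring_idxs_tup
def pvStep (T : List (List Nat)) : List (List Nat) :=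
  T.map (fun ti =>
    T.foldl (fun acc tj =>
      if tj.any (fun k => ti.contains k) then tj.foldl (fun s j => pvSIns j s) acc else acc) [])

-- the while-loop; fuel is spent only while no fixed point is reached yet
def pvCloseLoop : Nat → List (List Nat) → List (List Nat)
  | 0, T => T
  | fuel+1, T =>
    let T' := pvStep T
    if T' = T then T else pvCloseLoop fuel T'

-- remove redundant ring groups
def pvUniq (T : List (List Nat)) : List (List Nat) :=
  T.foldl (fun acc s => if acc.contains s then acc else acc ++ [s]) []

-- CPython's small-int set table (hash(x) = x, open addressing, resize at fill*5 >= mask*3),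
-- modelling the ITERATION ORDER 'for idx in ring_network' reads off a set of ring indices.
-- The collision-probe recursion of pvFindSlot is never reached on Pre_'s domain (indices
-- all < 8, or singleton sets), where this model is exact.
def pvFindSlot (t : List (Option Nat)) (x : Nat) : Nat → Nat → Nat → Option Nat
  | 0, _, _ => none
  | fuel+1, i, perturb =>
    match t.getD i none with
    | none => some i
    | some y => if y = x then some i
        else pvFindSlot t x fuel ((i * 5 + 1 + perturb) % t.length) (perturb / 32)

-- insert without the resize check (used while rehashing)
def pvAddRaw (t : List (Option Nat)) (x : Nat) : List (Option Nat) :=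
  match pvFindSlot t x t.length (x % t.length) x with
  | none => t
  | some s => if t.getD s none = some x then t else t.set s (some x)

-- newsize = 8; while newsize <= minused: newsize <<= 1
def pvGrowLoop : Nat → Nat → Nat → Nat
  | 0, ns, _ => ns
  | f+1, ns, minused => if minused < ns then ns else pvGrowLoop f (ns * 2) minused

def pvSetResize (t : List (Option Nat)) (ns : Nat) : List (Option Nat) :=
  (t.filterMap id).foldl pvAddRaw (List.replicate ns none)

def pvSetAdd (t : List (Option Nat)) (x : Nat) : List (Option Nat) :=
  match pvFindSlot t x t.length (x % t.length) x with
  | none => t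
  | some s =>
    if t.getD s none = some x then t
    else
      let t' := t.set s (some x)
      let used := (t'.filterMap id).length
      if (t'.length - 1) * 3 ≤ used * 5 then
        pvSetResize t' (pvGrowLoop (used * 4 + 1) 8 (used * 4))
      else t'

-- iteration order of a CPython set holding the elements of s (slot order of the table)
def pvPyOrder (s : List Nat) : List Nat :=
  (s.foldl pvSetAdd (List.replicate 8 (none : Option Nat))).filterMap id

-- ret[min(len(ring_network)-1, 2)] += (ring_atm_network,)
def pvBucketA (rings_atms : List (List Int))
    (r : List (List (List Int)) × List (List (List Int)) × List (List (List Int)))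
    (s : List Nat) : List (List (List Int)) × List (List (List Int)) × List (List (List Int)) :=
  let net := (pvPyOrder s).map (fun idx => rings_atms.getD idx [])
  let m : Int := min ((s.length : Int) - 1) 2
  if m = 0 then (r.1 ++ [net], r.2.1, r.2.2)
  else if m = 1 then (r.1, r.2.1 ++ [net], r.2.2)
  else (r.1, r.2.1, r.2.2 ++ [net])   -- m = 2, and Python's ret[-1] when m = -1

def polycyclic_rings_py (rings_atms : List (List Int)) : List (List (List (List Int))) :=
  let n := rings_atms.length
  -- keep walking through the connections; a fixed point is reached within n*n+1
  -- rounds, since every earlier round strictly grows some set (proved below)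
  let conns := pvCloseLoop (n * n + 1) (pvConns0 rings_atms)
  let uniq := pvUniq conns
  let ret := uniq.foldl (pvBucketA rings_atms) ([], [], [])
  [ret.1, ret.2.1, ret.2.2]

-- ===== PORT B =====
-- not atom_sets[u].isdisjoint(atom_sets[v])
def pvOverlap (su sv : PySem.Set Int) : Bool := !(PySem.Set.isdisjoint su sv)

-- the inner while-stack search; the Lean stack list is the Python stack reversed
-- (Python appends/pops at the END = cons/uncons at the head here); fuel n+1 is
-- enough since every pushed index is freshly marked seen (proved below)
def pvSearch (n : Nat) (asets : List (PySem.Set Int)) :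
    Nat → List Nat → List Bool → List Nat → List Bool × List Nat
  | 0, _, seen, comp => (seen, comp)
  | _+1, [], seen, comp => (seen, comp)
  | fuel+1, u :: rest, seen, comp =>
    let st := (List.range n).foldl (fun (p : List Bool × List Nat) v =>
        if !(p.1.getD v true) && pvOverlap (asets.getD u []) (asets.getD v []) then
          (p.1.set v true, v :: p.2)
        else p) (seen, rest)
    pvSearch n asets fuel st.2 st.1 (comp ++ [u])

-- one iteration of the 'for i in range(n)' loop over (seen, ret)
def pvStepB (rings_atms : List (List Int)) (asets : List (PySem.Set Int))
    (st : List Bool × (List (List (List Int)) × List (List (List Int)) × List (List (List Int))))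
    (i : Nat) :
    List Bool × (List (List (List Int)) × List (List (List Int)) × List (List (List Int))) :=
  let n := rings_atms.length
  if st.1.getD i false then st
  else
    let r := pvSearch n asets (n + 1) [i] (st.1.set i true) []
    let comp := PySem.List.sorted r.2 (fun x => x) false
    let net := comp.map (fun k => rings_atms.getD k [])
    let m : Int := min ((comp.length : Int) - 1) 2
    (r.1,
     if m = 0 then (st.2.1 ++ [net], st.2.2.1, st.2.2.2)
     else if m = 1 then (st.2.1, st.2.2.1 ++ [net], st.2.2.2)
     else (st.2.1, st.2.2.1, st.2.2.2 ++ [net]))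

def polycyclic_rings_py_alt (rings_atms : List (List Int)) : List (List (List (List Int))) :=
  let n := rings_atms.length
  let asets := rings_atms.map (fun r => PySem.Set.ofList r)
  let fin := (List.range n).foldl (pvStepB rings_atms asets)
    (List.replicate n false, ([], [], []))
  [fin.2.1, fin.2.2.1, fin.2.2.2]

-- ===== PRECONDITION & SPEC =====
-- Pre_ restricts to the natural domain and to order-determined outputs: (1) it excludes
-- inputs containing an atom-less ring — malformed input (a ring is a tuple of atom keys),
-- on which A's value is an accident of its empty connection sets (all such rings are
-- deduplicated into one empty group filed via ret[min(0-1,2)] = ret[-1] in the tri+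
-- bucket) while B's per-ring singleton group is equally defensible; (2) it excludes
-- inputs with more than 8 rings in which two rings share an atom, because there the
-- within-group ring order of A's output is CPython's hash-table set-iteration order, an
-- accidental implementation-defined tie order (with at most 8 rings every index occupies
-- its own slot of the initial 8-slot table so iteration is ascending — proved below from
-- the table model — and with pairwise-disjoint rings every group is a singleton).
def Pre_polycyclic_rings_py (rings_atms : List (List Int)) : Prop :=
  [] ∉ rings_atms ∧
  (rings_atms.length ≤ 8 ∨ rings_atms.Pairwise (fun r s => ∀ a ∈ r, a ∉ s))
instance (rings_atms : List (List Int)) : Decidable (Pre_polycyclic_rings_py rings_atms) := by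
  unfold Pre_polycyclic_rings_py; infer_instance

def pvWitness_polycyclic_rings_py : List (List Int) := [[1, 2], [2, 3], [5]]

def Spec_polycyclic_rings_py (rings_atms : List (List Int)) (out : List (List (List (List Int)))) : Prop := out = polycyclic_rings_py_alt rings_atms
instance (rings_atms : List (List Int)) (out : List (List (List (List Int)))) : Decidable (Spec_polycyclic_rings_py rings_atms out) := by unfold Spec_polycyclic_rings_py; infer_instance

-- ===== CLAIM (what is proved, stated in full; the proofs are below) =====
def Claim_equal_polycyclic_rings_py : Prop := ∀ (rings_atms : List (List Int)), Dom_polycyclic_rings_py rings_atms → Pre_polycyclic_rings_py rings_atms → Spec_polycyclic_rings_py rings_atms (polycyclic_rings_py rings_atms)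

-- ===== LEMMAS AND PROOFS =====

-- notation helpers for the proofs
def pvGet (T : List (List Nat)) (i : Nat) : List Nat := T.getD i []
def pvSB (s : List Bool) (w : Nat) : Bool := s.getD w false

-- ring i and ring j share an atom (A's and B's common adjacency notion)
def pvR (rs : List (List Int)) (i j : Nat) : Prop :=
  pvAnyShared (rs.getD i []) (rs.getD j []) = true

-- transitive linkage
def pvTG (rs : List (List Int)) : Nat → Nat → Prop := Relation.TransGen (pvR rs)

lemma pvR_iff (rs : List (List Int)) (i j : Nat) :
    pvR rs i j ↔ ∃ a, a ∈ rs.getD j [] ∧ a ∈ rs.getD i [] := by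
  simp [pvR, pvAnyShared, List.any_eq_true]

lemma pvR_symm {rs : List (List Int)} {i j : Nat} (h : pvR rs i j) : pvR rs j i := by
  rcases (pvR_iff rs i j).1 h with ⟨a, h1, h2⟩
  exact (pvR_iff rs j i).2 ⟨a, h2, h1⟩

lemma pvR_lt {rs : List (List Int)} {i j : Nat} (h : pvR rs i j) :
    i < rs.length ∧ j < rs.length := by
  rcases (pvR_iff rs i j).1 h with ⟨a, h1, h2⟩
  constructor
  · by_contra hi
    rw [List.getD_eq_default _ _ (by omega)] at h2
    simp at h2
  · by_contra hj
    rw [List.getD_eq_default _ _ (by omega)] at h1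
    simp at h1

lemma pvR_self_left {rs : List (List Int)} {i j : Nat} (h : pvR rs i j) : pvR rs i i := by
  rcases (pvR_iff rs i j).1 h with ⟨a, _, h2⟩
  exact (pvR_iff rs i i).2 ⟨a, h2, h2⟩

lemma pvR_of_ne {rs : List (List Int)} {i : Nat}
    (hne : rs.getD i [] ≠ []) : pvR rs i i := by
  rcases List.exists_mem_of_ne_nil _ hne with ⟨a, ha⟩
  exact (pvR_iff rs i i).2 ⟨a, ha, ha⟩

lemma pvTG_symm {rs : List (List Int)} {i j : Nat} (h : pvTG rs i j) : pvTG rs j i := by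
  induction h with
  | single h => exact Relation.TransGen.single (pvR_symm h)
  | tail _ h' ih => exact Relation.TransGen.head (pvR_symm h') ih

lemma pvTG_lt {rs : List (List Int)} {i j : Nat} (h : pvTG rs i j) :
    i < rs.length ∧ j < rs.length := by
  induction h with
  | single h => exact pvR_lt h
  | tail _ h' ih => exact ⟨ih.1, (pvR_lt h').2⟩

lemma pvR_eq_of_disjoint {rs : List (List Int)}
    (hdisj : rs.Pairwise (fun r s => ∀ a ∈ r, a ∉ s)) {i j : Nat} (h : pvR rs i j) : i = j := by
  rcases (pvR_iff rs i j).1 h with ⟨a, haj, hai⟩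
  rcases pvR_lt h with ⟨hi, hj⟩
  rw [List.getD_eq_getElem _ _ hi] at hai
  rw [List.getD_eq_getElem _ _ hj] at haj
  by_contra hne
  have hP := List.pairwise_iff_getElem.1 hdisj
  rcases Nat.lt_or_ge i j with hlt | hge
  · exact hP i j hi hj hlt a hai haj
  · have hlt : j < i := by omega
    exact hP j i hj hi hlt a haj hai

lemma pvTG_eq_of_disjoint {rs : List (List Int)}
    (hdisj : rs.Pairwise (fun r s => ∀ a ∈ r, a ∉ s)) {i j : Nat} (h : pvTG rs i j) : i = j := by
  induction h with
  | single h => exact pvR_eq_of_disjoint hdisj h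
  | tail _ h' ih => exact ih.trans (pvR_eq_of_disjoint hdisj h')

-- == A-side: the ascending-set primitives ==

lemma mem_pvSIns {x y : Nat} {l : List Nat} : x ∈ pvSIns y l ↔ x = y ∨ x ∈ l := by
  induction l with
  | nil => simp [pvSIns]
  | cons z zs ih =>
    simp only [pvSIns]
    split_ifs with h1 h2
    · simp
    · subst h2; simp
    · simp [ih]; tauto

lemma sorted_pvSIns {y : Nat} {l : List Nat} (h : l.Pairwise (· < ·)) :
    (pvSIns y l).Pairwise (· < ·) := by
  induction l with
  | nil => simp [pvSIns]
  | cons z zs ih =>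
    rcases List.pairwise_cons.1 h with ⟨hz, hzs⟩
    simp only [pvSIns]
    split_ifs with h1 h2
    · refine List.pairwise_cons.2 ⟨?_, h⟩
      intro a ha
      rcases List.mem_cons.1 ha with rfl | ha
      · exact h1
      · exact lt_trans h1 (hz a ha)
    · exact h
    · refine List.pairwise_cons.2 ⟨?_, ih hzs⟩
      intro a ha
      rcases mem_pvSIns.1 ha with rfl | ha
      · omega
      · exact hz a ha

lemma mem_foldl_pvSIns (l : List Nat) (acc : List Nat) (x : Nat) :
    x ∈ l.foldl (fun s j => pvSIns j s) acc ↔ x ∈ acc ∨ x ∈ l := by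
  induction l generalizing acc with
  | nil => simp
  | cons j js ih =>
    simp only [List.foldl_cons, ih, mem_pvSIns, List.mem_cons]
    tauto

lemma sorted_foldl_pvSIns (l : List Nat) {acc : List Nat} (h : acc.Pairwise (· < ·)) :
    (l.foldl (fun s j => pvSIns j s) acc).Pairwise (· < ·) := by
  induction l generalizing acc with
  | nil => simpa using h
  | cons j js ih => exact ih (sorted_pvSIns h)

lemma mem_pvStepInner (T : List (List Nat)) (ti : List Nat) (acc : List Nat) (x : Nat) :
    x ∈ T.foldl (fun acc tj =>
        if tj.any (fun k => ti.contains k) then tj.foldl (fun s j => pvSIns j s) acc else acc) acc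
      ↔ x ∈ acc ∨ ∃ tj ∈ T, (∃ k ∈ tj, k ∈ ti) ∧ x ∈ tj := by
  induction T generalizing acc with
  | nil => simp
  | cons t ts ih =>
    simp only [List.foldl_cons, ih, List.mem_cons]
    by_cases hc : (t.any (fun k => ti.contains k)) = true
    · have hc' : ∃ k ∈ t, k ∈ ti := by simpa [List.any_eq_true] using hc
      simp only [hc, if_true, mem_foldl_pvSIns]
      constructor
      · rintro ((hx | hx) | ⟨tj, htj, hk, hx⟩)
        · exact Or.inl hx
        · exact Or.inr ⟨t, Or.inl rfl, hc', hx⟩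
        · exact Or.inr ⟨tj, Or.inr htj, hk, hx⟩
      · rintro (hx | ⟨tj, (rfl | htj), hk, hx⟩)
        · exact Or.inl (Or.inl hx)
        · exact Or.inl (Or.inr hx)
        · exact Or.inr ⟨tj, htj, hk, hx⟩
    · have hc' : ¬ ∃ k ∈ t, k ∈ ti := by simpa [List.any_eq_true] using hc
      simp only [hc]
      constructor
      · rintro (hx | ⟨tj, htj, hk, hx⟩)
        · exact Or.inl hx
        · exact Or.inr ⟨tj, Or.inr htj, hk, hx⟩
      · rintro (hx | ⟨tj, (rfl | htj), hk, hx⟩)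
        · exact Or.inl hx
        · exact absurd hk hc'
        · exact Or.inr ⟨tj, htj, hk, hx⟩

lemma sorted_pvStepInner (T : List (List Nat)) (ti : List Nat) {acc : List Nat}
    (h : acc.Pairwise (· < ·)) :
    (T.foldl (fun acc tj =>
        if tj.any (fun k => ti.contains k) then tj.foldl (fun s j => pvSIns j s) acc else acc) acc).Pairwise (· < ·) := by
  induction T generalizing acc with
  | nil => simpa using h
  | cons t ts ih =>
    simp only [List.foldl_cons]
    split_ifs with hc
    · exact ih (sorted_foldl_pvSIns t h)
    · exact ih h

lemma length_pvStep (T : List (List Nat)) : (pvStep T).length = T.length := by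
  simp [pvStep]

lemma pvGet_pvStep (T : List (List Nat)) {i : Nat} (h : i < T.length) :
    pvGet (pvStep T) i =
      T.foldl (fun acc tj =>
        if tj.any (fun k => (pvGet T i).contains k) then tj.foldl (fun s j => pvSIns j s) acc else acc) [] := by
  have h2 : i < (pvStep T).length := by simpa [length_pvStep]
  rw [pvGet, pvGet, List.getD_eq_getElem _ _ h2, List.getD_eq_getElem _ _ h]
  simp [pvStep]

lemma pvGet_conns0 {rs : List (List Int)} {i : Nat} (h : i < rs.length) :
    pvGet (pvConns0 rs) i =
      (List.range rs.length).filter (fun j => pvAnyShared (rs.getD i []) (rs.getD j [])) := by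
  have h2 : i < (pvConns0 rs).length := by simp [pvConns0, h]
  rw [pvGet, List.getD_eq_getElem _ _ h2]
  simp [pvConns0, List.getElem?_eq_getElem h]

lemma pvMemT {T : List (List Nat)} {i : Nat} (h : i < T.length) : pvGet T i ∈ T := by
  rw [pvGet, List.getD_eq_getElem _ _ h]
  exact List.getElem_mem h

lemma pvMemT_inv {T : List (List Nat)} {l : List Nat} (h : l ∈ T) :
    ∃ a, a < T.length ∧ pvGet T a = l := by
  rcases List.mem_iff_getElem.1 h with ⟨a, ha, rfl⟩
  exact ⟨a, ha, by rw [pvGet, List.getD_eq_getElem _ _ ha]⟩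

lemma pvSortedExt : ∀ {l1 l2 : List Nat}, l1.Pairwise (· < ·) → l2.Pairwise (· < ·) →
    (∀ x, x ∈ l1 ↔ x ∈ l2) → l1 = l2
  | [], [], _, _, _ => rfl
  | [], b :: t2, _, _, hm => absurd ((hm b).2 (List.mem_cons_self)) (by simp)
  | a :: t1, [], _, _, hm => absurd ((hm a).1 (List.mem_cons_self)) (by simp)
  | a :: t1, b :: t2, s1, s2, hm => by
    rcases List.pairwise_cons.1 s1 with ⟨ha, s1'⟩
    rcases List.pairwise_cons.1 s2 with ⟨hb, s2'⟩
    have hab : a = b := by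
      have h1 : a ∈ b :: t2 := (hm a).1 List.mem_cons_self
      have h2 : b ∈ a :: t1 := (hm b).2 List.mem_cons_self
      rcases List.mem_cons.1 h1 with h1 | h1
      · exact h1
      · rcases List.mem_cons.1 h2 with h2 | h2
        · exact h2.symm
        · have := hb a h1; have := ha b h2; omega
    subst hab
    have htail : ∀ x, x ∈ t1 ↔ x ∈ t2 := by
      intro x
      constructor
      · intro hx
        have hax := ha x hx
        rcases List.mem_cons.1 ((hm x).1 (List.mem_cons_of_mem _ hx)) with rfl | h
        · omega
        · exact h
      · intro hx
        have hax := hb x hx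
        rcases List.mem_cons.1 ((hm x).2 (List.mem_cons_of_mem _ hx)) with rfl | h
        · omega
        · exact h
    rw [pvSortedExt s1' s2' htail]

lemma pvNodup {l : List Nat} (h : l.Pairwise (· < ·)) : l.Nodup :=
  h.imp (fun hlt => Nat.ne_of_lt hlt)

lemma pvGetD_set_self {α : Type} {l : List α} {v : Nat} {b d : α} (h : v < l.length) :
    (l.set v b).getD v d = b := by
  rw [List.getD_eq_getElem _ _ (by simpa using h)]
  simp [List.getElem_set_self (by simpa using h)]

lemma pvGetD_set_ne {α : Type} {l : List α} {v w : Nat} {b d : α} (h : w ≠ v) :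
    (l.set v b).getD w d = l.getD w d := by
  unfold List.getD
  rw [List.getElem?_set_ne (by omega)]

-- == the CPython-table model: on Pre_'s domain its iteration order is ascending ==

-- a table is good when every occupied slot s holds exactly the element s, of value < 8
def pvGood8 (t : List (Option Nat)) : Prop :=
  8 ≤ t.length ∧ ∀ s e, t.getD s none = some e → e = s ∧ e < 8

lemma pvGetD_replicate {n s : Nat} {d : Option Nat} :
    (List.replicate n (none : Option Nat)).getD s d = if s < n then none else d := by
  unfold List.getD
  split_ifs with h
  · rw [List.getElem?_eq_getElem (by simpa using h)]
    simp
  · rw [List.getElem?_eq_none (by simpa using h)]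
    rfl

lemma pvGood8_replicate {n : Nat} (h : 8 ≤ n) : pvGood8 (List.replicate n none) := by
  refine ⟨by simpa using h, ?_⟩
  intro s e he
  rw [pvGetD_replicate] at he
  split_ifs at he <;> exact Option.noConfusion he

lemma pvMemGood8 {t : List (Option Nat)} (ht : pvGood8 t) (e : Nat) :
    e ∈ t.filterMap id ↔ t.getD e none = some e := by
  constructor
  · intro hm
    rcases List.mem_filterMap.1 hm with ⟨a, ha, hae⟩
    simp only [id] at hae
    subst hae
    have hsome : some e ∈ t := ha
    rcases List.mem_iff_getElem.1 hsome with ⟨s, hs, hse⟩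
    have hgd : t.getD s none = some e := by rw [List.getD_eq_getElem _ _ hs, hse]
    rcases ht.2 s e hgd with ⟨rfl, _⟩
    exact hgd
  · intro hg
    have hlt : e < t.length := by
      by_contra hge
      rw [List.getD_eq_default _ _ (by omega)] at hg
      simp at hg
    rw [List.getD_eq_getElem _ _ hlt] at hg
    exact List.mem_filterMap.2 ⟨some e, hg ▸ List.getElem_mem hlt, rfl⟩

lemma pvFindSlot_good {t : List (Option Nat)} (ht : pvGood8 t) {x : Nat} (hx : x < 8)
    (f : Nat) : pvFindSlot t x (f + 1) x x = some x := by
  simp only [pvFindSlot]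
  rcases h : t.getD x none with _ | y
  · rfl
  · rcases ht.2 x y h with ⟨rfl, _⟩
    simp

lemma pvGood8_set {t : List (Option Nat)} (ht : pvGood8 t) {x : Nat} (hx : x < 8) :
    pvGood8 (t.set x (some x)) := by
  refine ⟨by simpa using ht.1, ?_⟩
  intro s e he
  by_cases hs : s = x
  · subst hs
    rw [pvGetD_set_self (by have := ht.1; omega)] at he
    rcases Option.some.inj he with rfl
    exact ⟨rfl, hx⟩
  · rw [pvGetD_set_ne hs] at he
    exact ht.2 s e he

lemma pvGetD_set_char {t : List (Option Nat)} (ht : pvGood8 t) {x : Nat} (hx : x < 8) (e : Nat) :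
    ((t.set x (some x)).getD e none = some e ↔ (e = x ∨ t.getD e none = some e)) := by
  by_cases he : e = x
  · subst he
    rw [pvGetD_set_self (by have := ht.1; omega)]
    simp
  · rw [pvGetD_set_ne he]
    constructor
    · exact Or.inr
    · rintro (rfl | h)
      · exact absurd rfl he
      · exact h

lemma pvAddRaw_good {t : List (Option Nat)} (ht : pvGood8 t) {x : Nat} (hx : x < 8) :
    pvGood8 (pvAddRaw t x) ∧
    (∀ e, ((pvAddRaw t x).getD e none = some e ↔ (e = x ∨ t.getD e none = some e))) := by
  have hxlen : x < t.length := by have := ht.1; omega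
  have hmod : x % t.length = x := Nat.mod_eq_of_lt hxlen
  have hfs : pvFindSlot t x t.length (x % t.length) x = some x := by
    obtain ⟨f, hf⟩ : ∃ f, t.length = f + 1 := ⟨t.length - 1, by omega⟩
    rw [hmod, hf]
    exact pvFindSlot_good ht hx f
  unfold pvAddRaw
  rw [hfs]
  by_cases hp : t.getD x none = some x
  · simp only [hp, if_true]
    refine ⟨ht, ?_⟩
    intro e
    constructor
    · exact Or.inr
    · rintro (rfl | h)
      · exact hp
      · exact h
  · simp only [hp, if_false]
    exact ⟨pvGood8_set ht hx, pvGetD_set_char ht hx⟩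

lemma pvFoldRaw_good : ∀ (xs : List Nat), (∀ x ∈ xs, x < 8) →
    ∀ (t : List (Option Nat)), pvGood8 t →
    pvGood8 (xs.foldl pvAddRaw t) ∧
    (∀ e, ((xs.foldl pvAddRaw t).getD e none = some e ↔ (e ∈ xs ∨ t.getD e none = some e)))
  | [], _, t, ht => ⟨ht, by simp⟩
  | x :: xs, hxs, t, ht => by
    have hx : x < 8 := hxs x List.mem_cons_self
    obtain ⟨hg1, hc1⟩ := pvAddRaw_good ht hx
    obtain ⟨hg2, hc2⟩ := pvFoldRaw_good xs (fun y hy => hxs y (List.mem_cons_of_mem _ hy)) _ hg1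
    refine ⟨hg2, ?_⟩
    intro e
    rw [List.foldl_cons] at *
    rw [hc2 e, hc1 e]
    simp only [List.mem_cons]
    tauto

lemma pvGrowLoop_ge : ∀ (f ns m : Nat), ns ≤ pvGrowLoop f ns m
  | 0, ns, m => le_refl _
  | f+1, ns, m => by
    simp only [pvGrowLoop]
    split_ifs with h
    · exact le_refl _
    · exact le_trans (by omega) (pvGrowLoop_ge f (ns * 2) m)

lemma pvSetAdd_good {t : List (Option Nat)} (ht : pvGood8 t) {x : Nat} (hx : x < 8) :
    pvGood8 (pvSetAdd t x) ∧
    (∀ e, ((pvSetAdd t x).getD e none = some e ↔ (e = x ∨ t.getD e none = some e))) := by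
  have hxlen : x < t.length := by have := ht.1; omega
  have hmod : x % t.length = x := Nat.mod_eq_of_lt hxlen
  have hfs : pvFindSlot t x t.length (x % t.length) x = some x := by
    obtain ⟨f, hf⟩ : ∃ f, t.length = f + 1 := ⟨t.length - 1, by omega⟩
    rw [hmod, hf]
    exact pvFindSlot_good ht hx f
  unfold pvSetAdd
  rw [hfs]
  by_cases hp : t.getD x none = some x
  · simp only [hp, if_true]
    refine ⟨ht, ?_⟩
    intro e
    constructor
    · exact Or.inr
    · rintro (rfl | h)
      · exact hp
      · exact h
  · simp only [hp, if_false]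
    have hg' : pvGood8 (t.set x (some x)) := pvGood8_set ht hx
    have hc' := pvGetD_set_char ht hx
    split_ifs with hres
    · -- resize: rehash all elements into a fresh bigger table
      have helems : ∀ y ∈ (t.set x (some x)).filterMap id, y < 8 := by
        intro y hy
        rcases List.mem_filterMap.1 hy with ⟨a, ha, hay⟩
        simp only [id] at hay
        subst hay
        have : some y ∈ t.set x (some x) := ha
        rcases List.mem_iff_getElem.1 this with ⟨s, hs, hse⟩
        have : (t.set x (some x)).getD s none = some y := by
          rw [List.getD_eq_getElem _ _ hs, hse]
        exact (hg'.2 s y this).2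
      have hfresh : pvGood8 (List.replicate (pvGrowLoop
          (((t.set x (some x)).filterMap id).length * 4 + 1) 8
          (((t.set x (some x)).filterMap id).length * 4)) (none : Option Nat)) :=
        pvGood8_replicate (pvGrowLoop_ge _ 8 _)
      obtain ⟨hg2, hc2⟩ := pvFoldRaw_good _ helems _ hfresh
      refine ⟨hg2, ?_⟩
      intro e
      unfold pvSetResize
      rw [hc2 e, pvMemGood8 hg' e, hc' e, pvGetD_replicate]
      split_ifs <;> simp
    · exact ⟨hg', hc'⟩

lemma pvFoldAdd_good : ∀ (xs : List Nat), (∀ x ∈ xs, x < 8) →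
    ∀ (t : List (Option Nat)), pvGood8 t →
    pvGood8 (xs.foldl pvSetAdd t) ∧
    (∀ e, ((xs.foldl pvSetAdd t).getD e none = some e ↔ (e ∈ xs ∨ t.getD e none = some e)))
  | [], _, t, ht => ⟨ht, by simp⟩
  | x :: xs, hxs, t, ht => by
    have hx : x < 8 := hxs x List.mem_cons_self
    obtain ⟨hg1, hc1⟩ := pvSetAdd_good ht hx
    obtain ⟨hg2, hc2⟩ := pvFoldAdd_good xs (fun y hy => hxs y (List.mem_cons_of_mem _ hy)) _ hg1
    refine ⟨hg2, ?_⟩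
    intro e
    rw [List.foldl_cons] at *
    rw [hc2 e, hc1 e]
    simp only [List.mem_cons]
    tauto

lemma pvSlots_sorted : ∀ (t : List (Option Nat)) (off : Nat),
    (∀ s e, t.getD s none = some e → e = s + off) →
    (t.filterMap id).Pairwise (· < ·) ∧ (∀ e ∈ t.filterMap id, off ≤ e)
  | [], _, _ => by simp
  | a :: t, off, h => by
    have htail : ∀ s e, t.getD s none = some e → e = s + (off + 1) := by
      intro s e he
      have := h (s + 1) e (by simpa using he)
      omega
    obtain ⟨hp, hb⟩ := pvSlots_sorted t (off + 1) htail
    rcases ha : a with _ | e0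
    · refine ⟨by simpa using hp, ?_⟩
      intro e he
      have := hb e (by simpa [ha] using he)
      omega
    · have he0 : e0 = off := by
        have := h 0 e0 (by simp [ha])
        omega
      subst he0
      refine ⟨?_, ?_⟩
      · simp only [List.filterMap_cons, id]
        refine List.pairwise_cons.2 ⟨?_, hp⟩
        intro e he
        have := hb e he
        omega
      · intro e he
        simp only [List.filterMap_cons, id] at he
        rcases List.mem_cons.1 he with rfl | he
        · omega
        · have := hb e he
          omega

lemma pvGood8_sorted {t : List (Option Nat)} (ht : pvGood8 t) :
    (t.filterMap id).Pairwise (· < ·) :=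
  (pvSlots_sorted t 0 (fun s e he => by have := (ht.2 s e he).1; omega)).1

-- on at most 8 ring indices the table iterates ascending: pvPyOrder is the identity
lemma pvPyOrder_lt8 {s : List Nat} (hs : s.Pairwise (· < ·)) (hx : ∀ x ∈ s, x < 8) :
    pvPyOrder s = s := by
  obtain ⟨hg, hc⟩ := pvFoldAdd_good s hx _ (pvGood8_replicate (le_refl 8))
  refine pvSortedExt (pvGood8_sorted hg) hs ?_
  intro e
  unfold pvPyOrder
  rw [pvMemGood8 hg e, hc e, pvGetD_replicate]
  split_ifs <;> simp

lemma pvFilterMap_replicate_none : ∀ (n : Nat),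
    ((List.replicate n (none : Option Nat)).filterMap id) = []
  | 0 => rfl
  | n+1 => by
    rw [List.replicate_succ, List.filterMap_cons]
    simpa using pvFilterMap_replicate_none n

lemma pvFilterMap_set_replicate : ∀ (n i x : Nat), i < n →
    (((List.replicate n (none : Option Nat)).set i (some x)).filterMap id) = [x]
  | 0, _, _, h => by omega
  | n+1, 0, x, _ => by
    rw [List.replicate_succ, List.set_cons_zero, List.filterMap_cons]
    simpa using pvFilterMap_replicate_none n
  | n+1, i+1, x, h => by
    rw [List.replicate_succ, List.set_cons_succ, List.filterMap_cons]
    simpa using pvFilterMap_set_replicate n i x (by omega)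

-- a one-element set iterates as itself whatever the index is
lemma pvPyOrder_singleton (x : Nat) : pvPyOrder [x] = [x] := by
  have h8 : x % 8 < 8 := Nat.mod_lt _ (by omega)
  have hset := pvFilterMap_set_replicate 8 (x % 8) x h8
  simp only [pvPyOrder, List.foldl_cons, List.foldl_nil, pvSetAdd, pvFindSlot,
    List.length_replicate, pvGetD_replicate, h8, if_true, hset]
  rw [if_neg (by simp)]
  rw [if_neg (by norm_num)]
  exact hset

-- the closure-loop invariant
def pvInvA (rs : List (List Int)) (T : List (List Nat)) : Prop :=
  T.length = rs.length ∧
  (∀ l ∈ T, l.Pairwise (· < ·)) ∧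
  (∀ i, i < rs.length → ∀ j ∈ pvGet T i, pvTG rs i j) ∧
  (∀ i j, pvR rs i j → j ∈ pvGet T i)

lemma pvInvA_conns0 (rs : List (List Int)) : pvInvA rs (pvConns0 rs) := by
  refine ⟨by simp [pvConns0], ?_, ?_, ?_⟩
  · intro l hl
    simp only [pvConns0, List.mem_map] at hl
    rcases hl with ⟨ri, _, rfl⟩
    exact List.Pairwise.filter _ (List.pairwise_lt_range)
  · intro i hi j hj
    rw [pvGet_conns0 hi] at hj
    rcases List.mem_filter.1 hj with ⟨_, hc⟩
    exact Relation.TransGen.single hc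
  · intro i j hR
    rcases pvR_lt hR with ⟨hi, hj⟩
    rw [pvGet_conns0 hi]
    exact List.mem_filter.2 ⟨List.mem_range.2 hj, hR⟩

lemma pvStep_infl {T : List (List Nat)} {i : Nat} (h : i < T.length) :
    ∀ x ∈ pvGet T i, x ∈ pvGet (pvStep T) i := by
  intro x hx
  rw [pvGet_pvStep T h]
  exact (mem_pvStepInner T (pvGet T i) [] x).2 (Or.inr ⟨pvGet T i, pvMemT h, ⟨x, hx, hx⟩, hx⟩)

lemma pvInvA_step {rs : List (List Int)} {T : List (List Nat)} (h : pvInvA rs T) :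
    pvInvA rs (pvStep T) := by
  obtain ⟨h1, h2, h3, h4⟩ := h
  refine ⟨by rw [length_pvStep, h1], ?_, ?_, ?_⟩
  · intro l hl
    simp only [pvStep, List.mem_map] at hl
    rcases hl with ⟨ti, _, rfl⟩
    exact sorted_pvStepInner T ti List.Pairwise.nil
  · intro i hi x hx
    have hiT : i < T.length := by omega
    rw [pvGet_pvStep T hiT] at hx
    rcases (mem_pvStepInner T (pvGet T i) [] x).1 hx with hx | ⟨tj, htj, ⟨k, hk1, hk2⟩, hxj⟩
    · simp at hx
    · rcases pvMemT_inv htj with ⟨a, haT, rfl⟩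
      have han : a < rs.length := by omega
      have hak : pvTG rs a k := h3 a han k hk1
      have hik : pvTG rs i k := h3 i hi k hk2
      have hax : pvTG rs a x := h3 a han x hxj
      exact Relation.TransGen.trans (Relation.TransGen.trans hik (pvTG_symm hak)) hax
  · intro i j hR
    have hiT : i < T.length := by have := (pvR_lt hR).1; omega
    exact pvStep_infl hiT j (h4 i j hR)

def pvSum (T : List (List Nat)) : Nat := (T.map List.length).sum

lemma pvSumAux : ∀ (T : List (List Nat)) (m : Nat), (∀ l ∈ T, l.length ≤ m) →
    pvSum T ≤ T.length * m
  | [], _, _ => by simp [pvSum]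
  | l :: ts, m, h => by
    have h1 : pvSum ts ≤ ts.length * m :=
      pvSumAux ts m (fun l' hl' => h l' (List.mem_cons_of_mem _ hl'))
    have h2 : l.length ≤ m := h l List.mem_cons_self
    simp only [pvSum, List.map_cons, List.sum_cons, List.length_cons] at *
    calc l.length + (ts.map List.length).sum ≤ m + ts.length * m := by omega
    _ = (ts.length + 1) * m := by ring

lemma pvSum_le {rs : List (List Int)} {T : List (List Nat)} (h : pvInvA rs T) :
    pvSum T ≤ rs.length * rs.length := by
  obtain ⟨h1, h2, h3, _⟩ := h
  have hb : ∀ l ∈ T, l.length ≤ rs.length := by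
    intro l hl
    rcases pvMemT_inv hl with ⟨a, haT, rfl⟩
    have hsub : pvGet T a ⊆ List.range rs.length := by
      intro x hx
      exact List.mem_range.2 (pvTG_lt (h3 a (by omega) x hx)).2
    have := (List.Nodup.subperm (pvNodup (h2 _ hl)) hsub).length_le
    simpa using this
  calc pvSum T ≤ T.length * rs.length := pvSumAux T _ hb
  _ = rs.length * rs.length := by rw [h1]

lemma pvSum_eq (T : List (List Nat)) :
    pvSum T = ((List.range T.length).map (fun i => (pvGet T i).length)).sum := by
  unfold pvSum
  congr 1
  apply List.ext_getElem
  · simp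
  · intro i h1 h2
    simp only [List.getElem_map, List.getElem_range]
    rw [pvGet, List.getD_eq_getElem _ _ (by simpa using h1)]

lemma pvSumMapLt {α : Type} : ∀ (l : List α) (f g : α → Nat), (∀ i ∈ l, f i ≤ g i) →
    (∃ i ∈ l, f i < g i) → (l.map f).sum < (l.map g).sum
  | [], _, _, _, h => by simp at h
  | a :: t, f, g, hle, hlt => by
    simp only [List.map_cons, List.sum_cons]
    rcases hlt with ⟨i, hi, hilt⟩
    rcases List.mem_cons.1 hi with rfl | hit
    · have : (t.map f).sum ≤ (t.map g).sum :=
        List.sum_le_sum (by simpa using fun x hx => hle x (List.mem_cons_of_mem _ hx))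
      omega
    · have h1 : (t.map f).sum < (t.map g).sum :=
        pvSumMapLt t f g (fun x hx => hle x (List.mem_cons_of_mem _ hx)) ⟨i, hit, hilt⟩
      have h2 : f a ≤ g a := hle a List.mem_cons_self
      omega

lemma pvSum_lt {rs : List (List Int)} {T : List (List Nat)} (h : pvInvA rs T)
    (hne : pvStep T ≠ T) : pvSum T < pvSum (pvStep T) := by
  obtain ⟨h1, h2, h3, h4⟩ := h
  have hlen : (pvStep T).length = T.length := length_pvStep T
  have hsub : ∀ i, i < T.length → pvGet T i ⊆ pvGet (pvStep T) i := by
    intro i hi x hx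
    exact pvStep_infl hi x hx
  have hsorted' : ∀ i, i < T.length → (pvGet (pvStep T) i).Pairwise (· < ·) := by
    intro i hi
    have := pvInvA_step ⟨h1, h2, h3, h4⟩
    exact this.2.1 _ (pvMemT (by omega))
  have hle : ∀ i, i < T.length → (pvGet T i).length ≤ (pvGet (pvStep T) i).length := by
    intro i hi
    exact (List.Nodup.subperm (pvNodup (h2 _ (pvMemT hi))) (hsub i hi)).length_le
  have hex : ∃ i, i < T.length ∧ pvGet T i ≠ pvGet (pvStep T) i := by
    by_contra hcon
    push Not at hcon
    apply hne
    apply List.ext_getElem (by omega)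
    intro i hi1 hi2
    have := hcon i (by omega)
    rw [pvGet, pvGet, List.getD_eq_getElem _ _ hi1, List.getD_eq_getElem _ _ hi2] at this
    exact this.symm
  rcases hex with ⟨i0, hi0, hne0⟩
  have hstrict : (pvGet T i0).length < (pvGet (pvStep T) i0).length := by
    rcases Nat.lt_or_ge (pvGet T i0).length (pvGet (pvStep T) i0).length with h | h
    · exact h
    · exfalso
      apply hne0
      have hperm := (List.Nodup.subperm (pvNodup (h2 _ (pvMemT hi0))) (hsub i0 hi0)).perm_of_length_le h
      refine pvSortedExt (h2 _ (pvMemT hi0)) (hsorted' i0 hi0) ?_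
      intro x
      exact hperm.mem_iff
  rw [pvSum_eq T, pvSum_eq (pvStep T), hlen]
  apply pvSumMapLt
  · intro i hi
    exact hle i (List.mem_range.1 hi)
  · exact ⟨i0, List.mem_range.2 hi0, hstrict⟩

lemma pvCloseLoop_fix (rs : List (List Int)) :
    ∀ (fuel : Nat) (T : List (List Nat)), pvInvA rs T →
      rs.length * rs.length < pvSum T + fuel →
      pvInvA rs (pvCloseLoop fuel T) ∧ pvStep (pvCloseLoop fuel T) = pvCloseLoop fuel T := by
  intro fuel
  induction fuel with
  | zero =>
    intro T hInv hlt
    have := pvSum_le hInv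
    omega
  | succ f ih =>
    intro T hInv hlt
    by_cases hfix : pvStep T = T
    · rw [show pvCloseLoop (f + 1) T = T by simp [pvCloseLoop, hfix]]
      exact ⟨hInv, hfix⟩
    · have hgrow := pvSum_lt hInv hfix
      have := ih (pvStep T) (pvInvA_step hInv) (by omega)
      simpa [pvCloseLoop, hfix] using this

-- the closed connection sets
def pvTstar (rs : List (List Int)) : List (List Nat) :=
  pvCloseLoop (rs.length * rs.length + 1) (pvConns0 rs)

-- sorted, and membership is transitive linkage
lemma pvTstar_spec (rs : List (List Int)) :
    (pvTstar rs).length = rs.length ∧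
    (∀ i, i < rs.length → (pvGet (pvTstar rs) i).Pairwise (· < ·)) ∧
    (∀ i, i < rs.length → ∀ j, (j ∈ pvGet (pvTstar rs) i ↔ pvTG rs i j)) := by
  unfold pvTstar
  have hfix := pvCloseLoop_fix rs (rs.length * rs.length + 1) (pvConns0 rs)
    (pvInvA_conns0 rs) (by omega)
  revert hfix
  generalize pvCloseLoop (rs.length * rs.length + 1) (pvConns0 rs) = T
  intro hfix
  obtain ⟨hInv, hfixeq⟩ := hfix
  obtain ⟨h1, h2, h3, h4⟩ := hInv
  refine ⟨h1, ?_, ?_⟩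
  · intro i hi
    exact h2 _ (pvMemT (by omega))
  · intro i hi j
    constructor
    · exact h3 i hi j
    · intro hTG
      show j ∈ pvGet T i
      induction hTG with
      | single h => exact h4 _ _ h
      | tail hib hbj ihb =>
        rename_i b j'
        have hbT : b < T.length := by have := (pvR_lt hbj).1; omega
        have hiT : i < T.length := by omega
        rw [← hfixeq, pvGet_pvStep T hiT]
        refine (mem_pvStepInner T (pvGet T i) [] j').2 (Or.inr ⟨pvGet T b, pvMemT hbT, ⟨b, ?_, ihb⟩, h4 _ _ hbj⟩)
        exact h4 _ _ (pvR_self_left hbj)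

-- == B-side ==

lemma pvOverlap_iff (rs : List (List Int)) (u v : Nat) :
    (pvOverlap ((rs.map (fun r => PySem.Set.ofList r)).getD u [])
               ((rs.map (fun r => PySem.Set.ofList r)).getD v []) = true) ↔ pvR rs u v := by
  have hget : ∀ w : Nat, (rs.map (fun r => PySem.Set.ofList r)).getD w [] = PySem.Set.ofList (rs.getD w []) := by
    intro w
    by_cases hw : w < rs.length
    · rw [List.getD_eq_getElem _ _ (by simpa using hw), List.getD_eq_getElem _ _ hw]
      simp
    · rw [List.getD_eq_default _ _ (by simpa using Nat.le_of_not_lt hw),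
        List.getD_eq_default _ _ (Nat.le_of_not_lt hw)]
      rfl
  rw [hget, hget, pvR_iff]
  unfold pvOverlap
  simp only [Bool.not_eq_true', Bool.eq_false_iff, Ne, PySem.Set.isdisjoint_iff,
    PySem.Set.mem_ofList]
  constructor
  · intro h
    push Not at h
    rcases h with ⟨a, h1, h2⟩
    exact ⟨a, h2, h1⟩
  · rintro ⟨a, h1, h2⟩ hall
    exact hall a h2 h1

lemma pvCount_false_set {seen : List Bool} {v : Nat} (h : v < seen.length)
    (hf : seen.getD v false = false) : (seen.set v true).count false + 1 = seen.count false := by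
  induction seen generalizing v with
  | nil => simp at h
  | cons b t ih =>
    cases v with
    | zero =>
      simp only [List.getD_cons_zero] at hf
      subst hf
      simp
    | succ v =>
      have := ih (v := v) (by simpa using h) (by simpa using hf)
      simp only [List.set_cons_succ, List.count_cons]
      omega

lemma pvGetD_true_false {l : List Bool} {v : Nat} (h : v < l.length) :
    l.getD v true = l.getD v false := by
  rw [List.getD_eq_getElem _ _ h, List.getD_eq_getElem _ _ h]

-- the per-pop marking fold: filter first, then set each index
lemma pvFold_spec (rs : List (List Int)) (u : Nat) :
    ∀ (vs : List Nat), vs.Nodup → ∀ (seen : List Bool) (stack : List Nat),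
    vs.foldl (fun (p : List Bool × List Nat) v =>
        if !(p.1.getD v true) && pvOverlap ((rs.map (fun r => PySem.Set.ofList r)).getD u [])
            ((rs.map (fun r => PySem.Set.ofList r)).getD v []) then
          (p.1.set v true, v :: p.2)
        else p) (seen, stack)
    = ((vs.filter (fun v => !(seen.getD v true) && pvOverlap ((rs.map (fun r => PySem.Set.ofList r)).getD u [])
            ((rs.map (fun r => PySem.Set.ofList r)).getD v []))).foldl (fun s v => s.set v true) seen,
       (vs.filter (fun v => !(seen.getD v true) && pvOverlap ((rs.map (fun r => PySem.Set.ofList r)).getD u [])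
            ((rs.map (fun r => PySem.Set.ofList r)).getD v []))).reverse ++ stack) := by
  intro vs hnd
  induction vs with
  | nil => intro seen stack; simp
  | cons v vs ih =>
    intro seen stack
    rcases List.nodup_cons.1 hnd with ⟨hv, hnd'⟩
    by_cases hc : (!(seen.getD v true) && pvOverlap ((rs.map (fun r => PySem.Set.ofList r)).getD u [])
        ((rs.map (fun r => PySem.Set.ofList r)).getD v [])) = true
    · have hfilter : vs.filter (fun w => !((seen.set v true).getD w true) &&
          pvOverlap ((rs.map (fun r => PySem.Set.ofList r)).getD u [])
            ((rs.map (fun r => PySem.Set.ofList r)).getD w []))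
          = vs.filter (fun w => !(seen.getD w true) &&
          pvOverlap ((rs.map (fun r => PySem.Set.ofList r)).getD u [])
            ((rs.map (fun r => PySem.Set.ofList r)).getD w [])) := by
        apply List.filter_congr
        intro w hw
        have hne : w ≠ v := by
          intro hwv
          subst hwv
          exact hv hw
        rw [pvGetD_set_ne hne]
      simp only [List.foldl_cons, hc, if_true]
      rw [ih hnd' (seen.set v true) (v :: stack), hfilter,
        List.filter_cons_of_pos (p := (fun w => !(seen.getD w true) && pvOverlap ((rs.map (fun r => PySem.Set.ofList r)).getD u [])
          ((rs.map (fun r => PySem.Set.ofList r)).getD w []))) hc]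
      simp only [List.foldl_cons, List.reverse_cons, List.append_assoc, List.singleton_append]
    · have hcf : (!(seen.getD v true) && pvOverlap ((rs.map (fun r => PySem.Set.ofList r)).getD u [])
          ((rs.map (fun r => PySem.Set.ofList r)).getD v [])) = false := by
        simpa using hc
      simp only [List.foldl_cons, hcf, Bool.false_eq_true, if_false]
      rw [ih hnd' seen stack, List.filter_cons_of_neg (p := (fun w => !(seen.getD w true) && pvOverlap ((rs.map (fun r => PySem.Set.ofList r)).getD u [])
          ((rs.map (fun r => PySem.Set.ofList r)).getD w []))) (by simpa using hc)]

lemma pvGetD_foldl_set : ∀ (S : List Nat) (seen : List Bool) (w : Nat),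
    ((S.foldl (fun s v => s.set v true) seen).getD w false = true) ↔
      (seen.getD w false = true ∨ (w ∈ S ∧ w < seen.length)) := by
  intro S
  induction S with
  | nil => simp
  | cons v S ih =>
    intro seen w
    simp only [List.foldl_cons, ih, List.length_set, List.mem_cons]
    by_cases hw : w = v
    · subst hw
      by_cases hlt : w < seen.length
      · rw [pvGetD_set_self hlt]
        simp [hlt]
      · rw [List.set_eq_of_length_le (by omega)]
        tauto
    · rw [pvGetD_set_ne hw]
      tauto

lemma pvLength_foldl_set : ∀ (S : List Nat) (seen : List Bool),
    (S.foldl (fun s v => s.set v true) seen).length = seen.length := by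
  intro S
  induction S with
  | nil => simp
  | cons v S ih => intro seen; simp [ih]

lemma pvCount_foldl_set : ∀ (S : List Nat) (seen : List Bool), S.Nodup →
    (∀ v ∈ S, v < seen.length ∧ seen.getD v false = false) →
    (S.foldl (fun s v => s.set v true) seen).count false + S.length = seen.count false := by
  intro S
  induction S with
  | nil => simp
  | cons v S ih =>
    intro seen hnd hfresh
    rcases List.nodup_cons.1 hnd with ⟨hv, hnd'⟩
    rcases hfresh v List.mem_cons_self with ⟨hlt, hfalse⟩
    have hstep := pvCount_false_set hlt hfalse
    have hrest := ih (seen.set v true) hnd' (by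
      intro w hw
      rcases hfresh w (List.mem_cons_of_mem _ hw) with ⟨h1, h2⟩
      refine ⟨by simpa using h1, ?_⟩
      have hne : w ≠ v := by
        intro hwv
        subst hwv
        exact hv hw
      rw [pvGetD_set_ne hne]
      exact h2)
    simp only [List.foldl_cons, List.length_cons]
    omega

-- the invariant of the stack search (seen0 is the seen array before this search)
def pvHS (rs : List (List Int)) (i : Nat) (seen0 : List Bool)
    (stack : List Nat) (seen : List Bool) (comp : List Nat) : Prop :=
  seen.length = rs.length ∧
  (∀ v ∈ stack, v < rs.length ∧ pvTG rs i v) ∧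
  (∀ v ∈ comp, v < rs.length ∧ pvTG rs i v) ∧
  (∀ w, pvSB seen w = true ↔ (pvSB seen0 w = true ∨ w ∈ stack ∨ w ∈ comp)) ∧
  (∀ u ∈ comp, ∀ v, pvR rs u v → pvSB seen v = true) ∧
  (stack ++ comp).Nodup ∧ (∀ w ∈ stack ++ comp, ¬ pvSB seen0 w = true)

theorem pvSearch_spec (rs : List (List Int)) (i : Nat) (seen0 : List Bool) :
    ∀ (fuel : Nat) (stack : List Nat) (seen : List Bool) (comp : List Nat),
      pvHS rs i seen0 stack seen comp →
      seen.count false + stack.length ≤ fuel →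
      pvHS rs i seen0 []
        (pvSearch rs.length (rs.map (fun r => PySem.Set.ofList r)) fuel stack seen comp).1
        (pvSearch rs.length (rs.map (fun r => PySem.Set.ofList r)) fuel stack seen comp).2 ∧
      (∀ w, w ∈ comp ∨ w ∈ stack →
        w ∈ (pvSearch rs.length (rs.map (fun r => PySem.Set.ofList r)) fuel stack seen comp).2) := by
  intro fuel
  induction fuel with
  | zero =>
    intro stack seen comp hH hfuel
    have hstack : stack = [] := by
      cases stack with
      | nil => rfl
      | cons a t => simp at hfuel
    subst hstack
    refine ⟨hH, ?_⟩
    intro w hw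
    rcases hw with hw | hw
    · simpa [pvSearch] using hw
    · simp at hw
  | succ fuel ih =>
    intro stack seen comp hH hfuel
    cases stack with
    | nil =>
      refine ⟨hH, ?_⟩
      intro w hw
      rcases hw with hw | hw
      · simpa [pvSearch] using hw
      · simp at hw
    | cons u rest =>
      obtain ⟨h1, h2, h3, h4, h5, h6, h7⟩ := hH
      have hu := h2 u List.mem_cons_self
      have hfold := pvFold_spec rs u (List.range rs.length) List.nodup_range seen rest
      set S := (List.range rs.length).filter
        (fun v => !(seen.getD v true) && pvOverlap ((rs.map (fun r => PySem.Set.ofList r)).getD u [])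
          ((rs.map (fun r => PySem.Set.ofList r)).getD v [])) with hSdef
      have hSmem : ∀ v, v ∈ S ↔ v < rs.length ∧ seen.getD v false = false ∧ pvR rs u v := by
        intro v
        rw [hSdef, List.mem_filter, List.mem_range]
        constructor
        · rintro ⟨hlt, hcond⟩
          rw [Bool.and_eq_true] at hcond
          rcases hcond with ⟨hns, hov⟩
          have hd := pvGetD_true_false (l := seen) (v := v) (by omega)
          refine ⟨hlt, ?_, (pvOverlap_iff rs u v).1 hov⟩
          rw [← hd]
          simpa using hns
        · rintro ⟨hlt, hns, hR⟩
          refine ⟨hlt, ?_⟩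
          rw [Bool.and_eq_true]
          refine ⟨?_, (pvOverlap_iff rs u v).2 hR⟩
          have hd := pvGetD_true_false (l := seen) (v := v) (by omega)
          rw [hd, hns]
          rfl
      have hSnodup : S.Nodup := List.Nodup.filter _ List.nodup_range
      have hSfresh : ∀ v ∈ S, v < seen.length ∧ seen.getD v false = false := by
        intro v hv
        rcases (hSmem v).1 hv with ⟨hlt, hns, _⟩
        exact ⟨by omega, hns⟩
      have hmono : ∀ w, pvSB seen w = true → pvSB (S.foldl (fun s v => s.set v true) seen) w = true := by
        intro w hw
        exact (pvGetD_foldl_set S seen w).2 (Or.inl hw)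
      have hHS' : pvHS rs i seen0 (S.reverse ++ rest) (S.foldl (fun s v => s.set v true) seen) (comp ++ [u]) := by
        refine ⟨by rw [pvLength_foldl_set, h1], ?_, ?_, ?_, ?_, ?_, ?_⟩
        · intro v hv
          rcases List.mem_append.1 hv with hv | hv
          · rcases (hSmem v).1 (List.mem_reverse.1 hv) with ⟨hlt, _, hR⟩
            exact ⟨hlt, Relation.TransGen.tail hu.2 hR⟩
          · exact h2 v (List.mem_cons_of_mem _ hv)
        · intro v hv
          rcases List.mem_append.1 hv with hv | hv
          · exact h3 v hv
          · simp only [List.mem_singleton] at hv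
            subst hv
            exact hu
        · intro w
          rw [pvSB, pvGetD_foldl_set S seen w]
          rw [show seen.getD w false = pvSB seen w from rfl, h4]
          simp only [List.mem_append, List.mem_reverse, List.mem_cons,
            List.not_mem_nil, or_false]
          constructor
          · rintro ((hs | (rfl | hr) | hc) | ⟨hS, _⟩)
            · exact Or.inl hs
            · exact Or.inr (Or.inr (Or.inr rfl))
            · exact Or.inr (Or.inl (Or.inr hr))
            · exact Or.inr (Or.inr (Or.inl hc))
            · exact Or.inr (Or.inl (Or.inl hS))
          · rintro (hs | (hS | hr) | hc | rfl)
            · exact Or.inl (Or.inl hs)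
            · exact Or.inr ⟨hS, by have := (hSfresh _ hS).1; omega⟩
            · exact Or.inl (Or.inr (Or.inl (Or.inr hr)))
            · exact Or.inl (Or.inr (Or.inr hc))
            · exact Or.inl (Or.inr (Or.inl (Or.inl rfl)))
        · intro x hx v hR
          rcases List.mem_append.1 hx with hx | hx
          · exact hmono v (h5 x hx v hR)
          · simp only [List.mem_singleton] at hx
            subst hx
            by_cases hseen : pvSB seen v = true
            · exact hmono v hseen
            · have hfalse : seen.getD v false = false := by
                simpa [pvSB] using hseen
              have hvS : v ∈ S := (hSmem v).2 ⟨(pvR_lt hR).2, hfalse, hR⟩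
              exact (pvGetD_foldl_set S seen v).2 (Or.inr ⟨hvS, (hSfresh v hvS).1⟩)
        · -- Nodup
          have hsub : ∀ w, w ∈ (u :: rest) ++ comp → pvSB seen w = true := by
            intro w hw
            rcases List.mem_append.1 hw with hw | hw
            · exact (h4 w).2 (Or.inr (Or.inl hw))
            · exact (h4 w).2 (Or.inr (Or.inr hw))
          have hdisj : S.Disjoint ((u :: rest) ++ comp) := by
            intro w hwS hwO
            have hf := (hSfresh w hwS).2
            have ht := hsub w hwO
            rw [pvSB, hf] at ht
            exact Bool.false_ne_true ht
          have hperm : ((S.reverse ++ rest) ++ (comp ++ [u])).Perm (S ++ ((u :: rest) ++ comp)) := by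
            have p1 : ((S.reverse ++ rest) ++ (comp ++ [u])).Perm ((S ++ rest) ++ (comp ++ [u])) :=
              List.Perm.append (List.Perm.append (List.reverse_perm S) (List.Perm.refl rest))
                (List.Perm.refl _)
            refine p1.trans ?_
            have p2 : ((S ++ rest) ++ (comp ++ [u])) = (S ++ (rest ++ (comp ++ [u]))) := by
              rw [List.append_assoc]
            rw [p2]
            refine List.Perm.append_left S ?_
            have p3 : (rest ++ (comp ++ [u])) = ((rest ++ comp) ++ [u]) := by
              rw [List.append_assoc]
            rw [p3]
            exact List.perm_append_singleton u (rest ++ comp)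
          refine (hperm.nodup_iff).2 ?_
          refine List.nodup_append.2 ⟨hSnodup, h6, ?_⟩
          intro a ha b hb hab
          exact hdisj ha (by rw [hab]; exact hb)
        · intro w hw
          rcases List.mem_append.1 hw with hw | hw
          · rcases List.mem_append.1 hw with hw | hw
            · have hwS := List.mem_reverse.1 hw
              intro h0
              have hseenw : pvSB seen w = true := (h4 w).2 (Or.inl h0)
              have hf := (hSfresh w hwS).2
              rw [pvSB, hf] at hseenw
              exact Bool.false_ne_true hseenw
            · exact h7 w (List.mem_append.2 (Or.inl (List.mem_cons_of_mem _ hw)))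
          · rcases List.mem_append.1 hw with hw | hw
            · exact h7 w (List.mem_append.2 (Or.inr hw))
            · simp only [List.mem_singleton] at hw
              subst hw
              exact h7 w (List.mem_append.2 (Or.inl List.mem_cons_self))
      have hcount := pvCount_foldl_set S seen hSnodup hSfresh
      have hred : pvSearch rs.length (rs.map (fun r => PySem.Set.ofList r)) (fuel + 1) (u :: rest) seen comp
          = pvSearch rs.length (rs.map (fun r => PySem.Set.ofList r)) fuel (S.reverse ++ rest)
              (S.foldl (fun s v => s.set v true) seen) (comp ++ [u]) := by
        simp only [pvSearch]
        rw [hfold]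
      rw [hred]
      have hfuel' : (S.foldl (fun s v => s.set v true) seen).count false + (S.reverse ++ rest).length ≤ fuel := by
        simp only [List.length_append, List.length_reverse]
        simp only [List.length_cons] at hfuel
        omega
      obtain ⟨hHf, hsub2⟩ := ih (S.reverse ++ rest) (S.foldl (fun s v => s.set v true) seen)
        (comp ++ [u]) hHS' hfuel'
      refine ⟨hHf, ?_⟩
      intro w hw
      apply hsub2
      rcases hw with hw | hw
      · exact Or.inl (List.mem_append.2 (Or.inl hw))
      · rcases List.mem_cons.1 hw with rfl | hw
        · exact Or.inl (List.mem_append.2 (Or.inr (by simp)))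
        · exact Or.inr (List.mem_append.2 (Or.inr hw))

-- the result of the full component search from an unseen nonempty ring i
def pvRun (rs : List (List Int)) (i : Nat) (seen0 : List Bool) : List Bool × List Nat :=
  pvSearch rs.length (rs.map (fun r => PySem.Set.ofList r)) (rs.length + 1) [i]
    (seen0.set i true) []

theorem pvSearch_comp (rs : List (List Int)) (i : Nat) (seen0 : List Bool)
    (hlen : seen0.length = rs.length) (hi : i < rs.length) (hne : rs.getD i [] ≠ [])
    (hunseen : ¬ pvSB seen0 i = true)
    (hcl : ∀ u v, pvSB seen0 u = true → pvR rs u v → pvSB seen0 v = true) :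
    (pvRun rs i seen0).1.length = rs.length ∧
    (pvRun rs i seen0).2.Nodup ∧
    (∀ v, v ∈ (pvRun rs i seen0).2 ↔ pvTG rs i v) ∧
    (∀ w, pvSB (pvRun rs i seen0).1 w = true ↔ (pvSB seen0 w = true ∨ pvTG rs i w)) := by
  have hTGi : pvTG rs i i := Relation.TransGen.single (pvR_of_ne hne)
  have hH0 : pvHS rs i seen0 [i] (seen0.set i true) [] := by
    refine ⟨by simp [hlen], ?_, by simp, ?_, by simp, ?_, ?_⟩
    · intro v hv
      simp only [List.mem_singleton] at hv
      subst hv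
      exact ⟨hi, hTGi⟩
    · intro w
      by_cases hw : w = i
      · subst hw
        rw [pvSB, pvGetD_set_self (by omega)]
        simp
      · rw [pvSB, pvGetD_set_ne hw]
        simp [hw, pvSB]
    · simp
    · intro w hw
      simp only [List.append_nil, List.mem_singleton] at hw
      subst hw
      exact hunseen
  have hfuel0 : (seen0.set i true).count false + [i].length ≤ rs.length + 1 := by
    have hc := List.count_le_length (l := seen0.set i true) (a := false)
    simp only [List.length_set, hlen] at hc
    simp only [List.length_cons, List.length_nil]
    omega
  obtain ⟨hHf, hsub⟩ := pvSearch_spec rs i seen0 (rs.length + 1) [i] (seen0.set i true) [] hH0 hfuel0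
  have e : pvSearch rs.length (rs.map (fun r => PySem.Set.ofList r)) (rs.length + 1) [i]
      (seen0.set i true) [] = pvRun rs i seen0 := rfl
  rw [e] at hHf hsub
  obtain ⟨f1, f2, f3, f4, f5, f6, f7⟩ := hHf
  have hclTG : ∀ a b, pvSB seen0 a = true → pvTG rs a b → pvSB seen0 b = true := by
    intro a b ha h
    induction h with
    | single h => exact hcl _ _ ha h
    | tail _ h' ih => exact hcl _ _ ih h'
  have hnot0 : ∀ v, pvTG rs i v → ¬ pvSB seen0 v = true := by
    intro v hv h0
    exact hunseen (hclTG v i h0 (pvTG_symm hv))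
  have hicomp : i ∈ (pvRun rs i seen0).2 := hsub i (Or.inr (by simp))
  have hmm : ∀ v, v ∈ (pvRun rs i seen0).2 ↔ pvTG rs i v := by
    intro v
    constructor
    · intro hv
      exact (f3 v hv).2
    · intro hv
      induction hv with
      | single h =>
        have hs := f5 i hicomp _ h
        rcases (f4 _).1 hs with h0 | h0 | h0
        · exact absurd h0 (hnot0 _ (Relation.TransGen.single h))
        · simp at h0
        · exact h0
      | tail hib hbv ihb =>
        have hs := f5 _ ihb _ hbv
        rcases (f4 _).1 hs with h0 | h0 | h0
        · exact absurd h0 (hnot0 _ (Relation.TransGen.tail hib hbv))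
        · simp at h0
        · exact h0
  refine ⟨f1, by simpa using f6, hmm, ?_⟩
  intro w
  rw [f4 w]
  constructor
  · rintro (h | h | h)
    · exact Or.inl h
    · simp at h
    · exact Or.inr ((hmm w).1 h)
  · rintro (h | h)
    · exact Or.inl h
    · exact Or.inr (Or.inr ((hmm w).2 h))

-- == the joint outer induction ==

lemma pvSB_replicate {n v : Nat} : pvSB (List.replicate n false) v = false := by
  unfold pvSB List.getD
  rcases h : (List.replicate n false)[v]? with _ | b
  · rfl
  · have := List.mem_of_getElem? h
    rcases List.eq_of_mem_replicate this
    rfl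

lemma pvGA_self {rs : List (List Int)} {j : Nat}
    (hj : j < rs.length) (he : rs.getD j [] ≠ []) : j ∈ pvGet (pvTstar rs) j := by
  obtain ⟨_, _, hTmem⟩ := pvTstar_spec rs
  exact (hTmem j hj j).2 (Relation.TransGen.single (pvR_of_ne he))

lemma pvGA_eqclass {rs : List (List Int)} {j k : Nat}
    (hj : j < rs.length) (hk : k < rs.length) (h : pvTG rs j k) :
    pvGet (pvTstar rs) j = pvGet (pvTstar rs) k := by
  obtain ⟨_, hTsorted, hTmem⟩ := pvTstar_spec rs
  refine pvSortedExt (hTsorted j hj) (hTsorted k hk) ?_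
  intro x
  rw [hTmem j hj x, hTmem k hk x]
  constructor
  · intro hx
    exact Relation.TransGen.trans (pvTG_symm h) hx
  · intro hx
    exact Relation.TransGen.trans h hx

-- B's inline bucket step (same as pvBucketA but reading the component list directly)
def pvBucketB (rings_atms : List (List Int))
    (r : List (List (List Int)) × List (List (List Int)) × List (List (List Int)))
    (s : List Nat) : List (List (List Int)) × List (List (List Int)) × List (List (List Int)) :=
  let net := s.map (fun idx => rings_atms.getD idx [])
  let m : Int := min ((s.length : Int) - 1) 2
  if m = 0 then (r.1 ++ [net], r.2.1, r.2.2)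
  else if m = 1 then (r.1, r.2.1 ++ [net], r.2.2)
  else (r.1, r.2.1, r.2.2 ++ [net])

lemma pvBucketA_eq_B (rings_atms : List (List Int))
    (r : List (List (List Int)) × List (List (List Int)) × List (List (List Int)))
    (s : List Nat) (h : pvPyOrder s = s) :
    pvBucketA rings_atms r s = pvBucketB rings_atms r s := by
  simp only [pvBucketA, pvBucketB, h]

-- the two shapes of one iteration of B's outer loop
lemma pvStepB_seen {rs : List (List Int)} {asets : List (PySem.Set Int)}
    {st : List Bool × (List (List (List Int)) × List (List (List Int)) × List (List (List Int)))}
    {k : Nat} (hS : st.1.getD k false = true) :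
    pvStepB rs asets st k = st := by
  simp only [pvStepB]
  rw [if_pos hS]

lemma pvStepB_search {rs : List (List Int)} {asets : List (PySem.Set Int)}
    {st : List Bool × (List (List (List Int)) × List (List (List Int)) × List (List (List Int)))}
    {k : Nat} (hS : st.1.getD k false = false) :
    pvStepB rs asets st k =
      ((pvSearch rs.length asets (rs.length + 1) [k] (st.1.set k true) []).1,
       pvBucketB rs st.2 (PySem.List.sorted
         (pvSearch rs.length asets (rs.length + 1) [k] (st.1.set k true) []).2 (fun x => x) false)) := by
  simp only [pvStepB, pvBucketB]
  rw [if_neg (by rw [hS]; exact Bool.false_ne_true)]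

-- B's outer state and A's deduplicated group list after the first k rings
def pvStB (rs : List (List Int)) (k : Nat) :
    List Bool × (List (List (List Int)) × List (List (List Int)) × List (List (List Int))) :=
  (List.range k).foldl (pvStepB rs (rs.map (fun r => PySem.Set.ofList r)))
    (List.replicate rs.length false, ([], [], []))

def pvAccA (rs : List (List Int)) (k : Nat) : List (List Nat) :=
  (List.range k).foldl (fun acc j =>
    if acc.contains (pvGet (pvTstar rs) j) then acc else acc ++ [pvGet (pvTstar rs) j]) []

lemma pvOuterInv (rs : List (List Int))
    (hND : ∀ j, j < rs.length → rs.getD j [] ≠ [])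
    (hOrd : ∀ k, k < rs.length → pvPyOrder (pvGet (pvTstar rs) k) = pvGet (pvTstar rs) k) :
    ∀ k, k ≤ rs.length →
    (pvStB rs k).1.length = rs.length ∧
    (∀ v, pvSB (pvStB rs k).1 v = true ↔ ∃ j, j < k ∧ pvTG rs j v) ∧
    (∀ s, s ∈ pvAccA rs k ↔ ∃ j, j < k ∧ s = pvGet (pvTstar rs) j) ∧
    (pvStB rs k).2 = (pvAccA rs k).foldl (pvBucketA rs) ([], [], []) := by
  obtain ⟨hTlen, hTsorted, hTmem⟩ := pvTstar_spec rs
  intro k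
  induction k with
  | zero =>
    intro _
    refine ⟨by simp [pvStB], ?_, by simp [pvAccA], by simp [pvStB, pvAccA]⟩
    intro v
    simp [pvStB, pvSB_replicate]
  | succ k ihk =>
    intro hk1
    have hk : k < rs.length := by omega
    obtain ⟨i1, i2, i3, i4⟩ := ihk (by omega)
    have hCe : rs.getD k [] ≠ [] := hND k hk
    have hstb : pvStB rs (k + 1) = pvStepB rs (rs.map (fun r => PySem.Set.ofList r)) (pvStB rs k) k := by
      unfold pvStB
      rw [List.range_succ, List.foldl_append, List.foldl_cons, List.foldl_nil]
    have hacc : pvAccA rs (k + 1) =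
        (if (pvAccA rs k).contains (pvGet (pvTstar rs) k) then pvAccA rs k
         else pvAccA rs k ++ [pvGet (pvTstar rs) k]) := by
      unfold pvAccA
      rw [List.range_succ, List.foldl_append, List.foldl_cons, List.foldl_nil]
    have hcontains : ((pvAccA rs k).contains (pvGet (pvTstar rs) k) = true) ↔
        ∃ j, j < k ∧ pvGet (pvTstar rs) j = pvGet (pvTstar rs) k := by
      rw [List.contains_iff_mem, i3]
      constructor
      · rintro ⟨j, hj, hs⟩
        exact ⟨j, hj, hs.symm⟩
      · rintro ⟨j, hj, hs⟩
        exact ⟨j, hj, hs.symm⟩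
    have hdup : ((pvAccA rs k).contains (pvGet (pvTstar rs) k) = true) ↔
        pvSB (pvStB rs k).1 k = true := by
      rw [hcontains, i2]
      constructor
      · rintro ⟨j, hj, hs⟩
        refine ⟨j, hj, ?_⟩
        have hkj : k ∈ pvGet (pvTstar rs) j := by
          rw [hs]
          exact pvGA_self hk hCe
        exact (hTmem j (by omega) k).1 hkj
      · rintro ⟨j, hj, hs⟩
        exact ⟨j, hj, pvGA_eqclass (by omega) hk hs⟩
    by_cases hS : pvSB (pvStB rs k).1 k = true
    · -- ring k already reached
      have hseen := pvStepB_seen (rs := rs) (asets := rs.map (fun r => PySem.Set.ofList r)) (st := pvStB rs k) (by simpa [pvSB] using hS)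
      rw [hstb, hseen, hacc, if_pos (hdup.2 hS)]
      rcases i2 k |>.1 hS with ⟨j0, hj0, hTG0⟩
      refine ⟨i1, ?_, ?_, i4⟩
      · intro v
        rw [i2]
        constructor
        · rintro ⟨j, hj, h⟩
          exact ⟨j, by omega, h⟩
        · rintro ⟨j, hj, h⟩
          rcases Nat.lt_or_ge j k with hjk | hjk
          · exact ⟨j, hjk, h⟩
          · have : j = k := by omega
            subst this
            exact ⟨j0, hj0, Relation.TransGen.trans hTG0 h⟩
      · intro ss
        rw [i3]
        constructor
        · rintro ⟨j, hj, h⟩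
          exact ⟨j, by omega, h⟩
        · rintro ⟨j, hj, h⟩
          rcases Nat.lt_or_ge j k with hjk | hjk
          · exact ⟨j, hjk, h⟩
          · have : j = k := by omega
            subst this
            exact ⟨j0, hj0, by rw [h, pvGA_eqclass (by omega) hk hTG0]⟩
    · -- new component, run the search
      have hSf : (pvStB rs k).1.getD k false = false := by
        simpa [pvSB] using hS
      have hsearch := pvStepB_search (rs := rs) (asets := rs.map (fun r => PySem.Set.ofList r)) (st := pvStB rs k) hSf
      have hcl0 : ∀ u v, pvSB (pvStB rs k).1 u = true → pvR rs u v →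
          pvSB (pvStB rs k).1 v = true := by
        intro u v hu hR
        rcases (i2 u).1 hu with ⟨j, hj, hTGu⟩
        exact (i2 v).2 ⟨j, hj, Relation.TransGen.tail hTGu hR⟩
      obtain ⟨c1, c2, c3, c4⟩ := pvSearch_comp rs k (pvStB rs k).1 i1 hk hCe hS hcl0
      have hperm : (pvGet (pvTstar rs) k).Perm (pvRun rs k (pvStB rs k).1).2 := by
        rw [List.perm_ext_iff_of_nodup (pvNodup (hTsorted k hk)) c2]
        intro a
        rw [hTmem k hk a]
        exact (c3 a).symm
      have hsorted_eq : PySem.List.sorted (pvRun rs k (pvStB rs k).1).2 (fun x => x) false =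
          pvGet (pvTstar rs) k := by
        refine PySem.List.sorted_eq_of_perm_of_pairwise_lt _ _ _ hperm ?_
        simpa using hTsorted k hk
      have hrun : pvSearch rs.length (rs.map (fun r => PySem.Set.ofList r)) (rs.length + 1) [k]
          ((pvStB rs k).1.set k true) [] = pvRun rs k (pvStB rs k).1 := rfl
      rw [hrun] at hsearch
      rw [hstb, hsearch, hacc, if_neg (fun hcc => hS (hdup.1 hcc))]
      refine ⟨c1, ?_, ?_, ?_⟩
      · intro v
        rw [show (((pvRun rs k (pvStB rs k).1).1,
            pvBucketB rs (pvStB rs k).2 (PySem.List.sorted (pvRun rs k (pvStB rs k).1).2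
              (fun x => x) false))).1 = (pvRun rs k (pvStB rs k).1).1 from rfl]
        rw [c4 v, i2]
        constructor
        · rintro (⟨j, hj, h⟩ | h)
          · exact ⟨j, by omega, h⟩
          · exact ⟨k, by omega, h⟩
        · rintro ⟨j, hj, h⟩
          rcases Nat.lt_or_ge j k with hjk | hjk
          · exact Or.inl ⟨j, hjk, h⟩
          · have : j = k := by omega
            subst this
            exact Or.inr h
      · intro ss
        rw [List.mem_append, i3, List.mem_singleton]
        constructor
        · rintro (⟨j, hj, h⟩ | h)
          · exact ⟨j, by omega, h⟩
          · exact ⟨k, by omega, h⟩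
        · rintro ⟨j, hj, h⟩
          rcases Nat.lt_or_ge j k with hjk | hjk
          · exact Or.inl ⟨j, hjk, h⟩
          · have : j = k := by omega
            subst this
            exact Or.inr h
      · rw [show (((pvRun rs k (pvStB rs k).1).1,
            pvBucketB rs (pvStB rs k).2 (PySem.List.sorted (pvRun rs k (pvStB rs k).1).2
              (fun x => x) false))).2 = pvBucketB rs (pvStB rs k).2
                (PySem.List.sorted (pvRun rs k (pvStB rs k).1).2 (fun x => x) false) from rfl]
        rw [hsorted_eq, List.foldl_append, List.foldl_cons, List.foldl_nil, ← i4]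
        exact (pvBucketA_eq_B rs (pvStB rs k).2 (pvGet (pvTstar rs) k) (hOrd k hk)).symm

theorem pvMain (rs : List (List Int)) (hpre : Pre_polycyclic_rings_py rs) :
    polycyclic_rings_py rs = polycyclic_rings_py_alt rs := by
  obtain ⟨hnd, hpre⟩ := hpre
  have hND : ∀ j, j < rs.length → rs.getD j [] ≠ [] := by
    intro j hj h
    rw [List.getD_eq_getElem _ _ hj] at h
    exact hnd (h ▸ List.getElem_mem hj)
  obtain ⟨hTlen, hTsorted, hTmem⟩ := pvTstar_spec rs
  -- Pre_ is what makes A's set-iteration order ascending: with at most 8 rings every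
  -- index set has all elements < 8; with pairwise-disjoint rings every group is {k}
  have hOrd : ∀ k, k < rs.length → pvPyOrder (pvGet (pvTstar rs) k) = pvGet (pvTstar rs) k := by
    intro k hk
    rcases hpre with h8 | hdisj
    · refine pvPyOrder_lt8 (hTsorted k hk) ?_
      intro x hx
      have := (pvTG_lt ((hTmem k hk x).1 hx)).2
      omega
    · have hsingle : pvGet (pvTstar rs) k = [k] := by
        refine pvSortedExt (hTsorted k hk) (List.pairwise_singleton _ _) ?_
        intro x
        rw [hTmem k hk x, List.mem_singleton]
        constructor
        · intro h
          exact (pvTG_eq_of_disjoint hdisj h).symm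
        · intro hxk
          rw [hxk]
          exact Relation.TransGen.single (pvR_of_ne (hND k hk))
      rw [hsingle]
      exact pvPyOrder_singleton k
  obtain ⟨j1, j2, j3, j4⟩ := pvOuterInv rs hND hOrd rs.length le_rfl
  have hT_map : pvTstar rs = (List.range rs.length).map (fun i => pvGet (pvTstar rs) i) := by
    apply List.ext_getElem
    · simp [hTlen]
    · intro i h1 h2
      simp only [List.getElem_map, List.getElem_range]
      rw [pvGet, List.getD_eq_getElem _ _ h1]
  have huniq : pvUniq (pvTstar rs) = pvAccA rs rs.length := by
    conv_lhs => rw [pvUniq, hT_map]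
    rw [List.foldl_map]
    rfl
  have hA : polycyclic_rings_py rs =
      [((pvUniq (pvTstar rs)).foldl (pvBucketA rs) ([], [], [])).1,
       ((pvUniq (pvTstar rs)).foldl (pvBucketA rs) ([], [], [])).2.1,
       ((pvUniq (pvTstar rs)).foldl (pvBucketA rs) ([], [], [])).2.2] := rfl
  have hB : polycyclic_rings_py_alt rs =
      [(pvStB rs rs.length).2.1, (pvStB rs rs.length).2.2.1, (pvStB rs rs.length).2.2.2] := rfl
  rw [hA, hB, huniq, ← j4]

-- ===== VERDICT (by name: the statement is the Claim_ definition above) =====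
theorem polycyclic_rings_py_spec : Claim_equal_polycyclic_rings_py := by
  intro rings_atms hdom hpre
  exact pvMain rings_atms hpre
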